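-- pv_equiv track=rewrite | github.com/Ken1g/InterviewBit | Tasks/Math/numbers_of_NK.py | solve
-- ===== SOURCE A (Python) =====
-- def solve(A, B, C):
-- 	if len(A) == 0:
-- 		return 0
-- 	s = str(C)
-- 	l = len(s)
-- 	digits = []
-- 	for i in range(l):
-- 		digits.append(int(s[i]))
-- 	if B > l:
-- 		return 0
-- 	elif B < l:
-- 		if A[0] != 0:
-- 			return len(A) ** B
-- 		else:
-- 			if B == 1:
-- 				return len(A)
-- 			else:
-- 				return len(A) ** B - len(A) ** (B - 1)
-- 	else:
-- 		dp = []
-- 		dp.append(0)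
-- 		for i in range(1, B + 1):
-- 			dp.append(dp[i - 1] * len(A))
-- 			exist = 1
-- 			for k in range(i - 1):
-- 				if digits[k] not in A:
-- 					exist = 0
-- 			#########################
-- 			if exist:
-- 				add = 0
-- 				for m in A:
-- 					if m < digits[i - 1]:
-- 						if (m != 0) or (i != 1) or (B == 1):
-- 							add += 1
-- 				dp[i] += add
-- 		return dp[B]
-- ===== SOURCE B (Python) =====
-- def solve(A, B, C):
--     if not A:
--         return 0
--     digits = [int(ch) for ch in str(C)]
--     l = len(digits)
--     n = len(A)
--     if B > l:
--         return 0
--     if B < l: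
--         if A[0] != 0:
--             return n ** B
--         return n if B == 1 else n ** B - n ** (B - 1)
--     Aset = set(A)
--     total, valid = 0, True
--     for i, d in enumerate(digits):
--         total *= n
--         if valid:
--             total += sum(1 for m in A if m < d and (m != 0 or i != 0 or B == 1))
--             valid = d in Aset
--     return total
-- ===== Notes on version B (the rewrite author's own statement) =====
-- stated objective: alternative
-- what changed: Replaced the dp list and the per-position rescan of the whole digit prefix (list membership inside a nested loop) by a single forward pass that keeps a scalar Horner accumulator and a monotone prefix-validity flag updated by one set-membership test per digit.
-- outside the precondition, e.g. on solve([1, 2], 1, -5): A raises ValueError, B raises ValueError; on solve([1, 2], -1, 7): A returns 0.5, B returns 0.5; on solve([0, 1], 0, 7): A returns 0.5, B returns 0.5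
import Mathlib
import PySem

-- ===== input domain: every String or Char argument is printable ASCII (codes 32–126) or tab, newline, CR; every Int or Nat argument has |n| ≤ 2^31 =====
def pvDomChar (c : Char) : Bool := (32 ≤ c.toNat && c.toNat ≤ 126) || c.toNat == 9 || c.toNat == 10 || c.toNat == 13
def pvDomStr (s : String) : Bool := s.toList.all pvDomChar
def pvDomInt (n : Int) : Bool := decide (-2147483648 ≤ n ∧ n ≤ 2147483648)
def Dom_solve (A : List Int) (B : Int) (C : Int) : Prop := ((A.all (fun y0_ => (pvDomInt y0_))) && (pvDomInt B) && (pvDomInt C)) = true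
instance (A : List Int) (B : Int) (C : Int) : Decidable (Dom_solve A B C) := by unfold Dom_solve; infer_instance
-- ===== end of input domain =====

-- B replaces A's dp list and its per-position rescan of the whole digit prefix by a single
-- forward pass with a scalar Horner accumulator and a monotone prefix-validity flag (set membership).

-- ===== PORT A =====
-- body of A's loop 'for i in range(1, B + 1)' over the dp list (a named helper for the proofs;
-- the code is the literal loop body)
def solveStepA (A ds : List Int) (Bv : Int) (dp : List Int) (i : Int) : List Int :=
  -- dp.append(dp[i - 1] * len(A))
  let dp := dp ++ [PySem.List.pyGetD dp (i - 1) 0 * (A.length : Int)]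
  -- exist = 1; for k in range(i - 1): if digits[k] not in A: exist = 0
  let exist : Int :=
    (PySem.List.pyRange 0 (i - 1) 1).foldl
      (fun exist k => if PySem.List.pyGetD ds k 0 ∉ A then 0 else exist) 1
  if exist ≠ 0 then
    -- add = 0; for m in A: if m < digits[i-1]: if (m != 0) or (i != 1) or (B == 1): add += 1
    let add : Int :=
      A.foldl
        (fun add m =>
          if m < PySem.List.pyGetD ds (i - 1) 0 then
            if m ≠ 0 ∨ i ≠ 1 ∨ Bv = 1 then add + 1 else add
          else add) 0
    -- dp[i] += add
    PySem.List.pySetD dp i (PySem.List.pyGetD dp i 0 + add)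
  else dp

def solve (A : List Int) (B : Int) (C : Int) : Int :=
  if A.length = 0 then 0
  else
    let s := PySem.Int.toStr C
    let l : Int := PySem.Str.len s
    -- digits = []; for i in range(l): digits.append(int(s[i]))
    -- int(s[i]) is ported as ofStr? on the one-character string; '.getD 0' is unreachable
    -- under Pre_solve (C ≥ 0, so every character of str(C) is a decimal digit)
    let digits : List Int :=
      (PySem.List.pyRange 0 l 1).foldl
        (fun ds i =>
          ds ++ [((PySem.Str.pyGet? s i).bind (fun c => PySem.Int.ofStr? (String.mk [c]))).getD 0]) []
    if B > l then 0
    else if B < l then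
      -- len(A) ** B: B ≥ 0 under Pre_solve (a negative exponent yields a float in Python)
      if PySem.List.pyGetD A 0 0 ≠ 0 then (A.length : Int) ^ B.toNat
      else if B = 1 then (A.length : Int)
      else (A.length : Int) ^ B.toNat - (A.length : Int) ^ (B - 1).toNat
    else
      -- dp = []; dp.append(0); loop; return dp[B]
      PySem.List.pyGetD ((PySem.List.pyRange 1 (B + 1) 1).foldl (solveStepA A digits B) [0]) B 0

-- ===== PORT B =====
-- body of B's 'for i, d in enumerate(digits)' loop: state (total, valid)
def solveStepB (A : List Int) (Aset : PySem.Set Int) (Bv : Int)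
    (st : Int × Bool) (p : Int × Int) : Int × Bool :=
  let total := st.1 * (A.length : Int)
  if st.2 then
    (total + (A.countP (fun m => decide (m < p.2 ∧ (m ≠ 0 ∨ p.1 ≠ 0 ∨ Bv = 1))) : Int),
     PySem.Set.contains Aset p.2)
  else (total, st.2)

def solve_alt (A : List Int) (B : Int) (C : Int) : Int :=
  if A = [] then 0
  else
    let digits : List Int :=
      (PySem.Int.toChars C).map (fun ch => (PySem.Int.ofStr? (String.mk [ch])).getD 0)
    let l : Int := digits.length
    let n : Int := A.length
    if B > l then 0
    else if B < l then
      if A.headI ≠ 0 then n ^ B.toNat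
      else if B = 1 then n
      else n ^ B.toNat - n ^ (B - 1).toNat
    else
      ((PySem.List.enumerate digits 0).foldl (solveStepB A (PySem.Set.ofList A) B) (0, true)).1

-- ===== PRECONDITION & SPEC =====
-- Pre_ excludes only inputs where the Python A does not return an int: C < 0 (int('-') raises
-- ValueError) and, unless A is empty, B < 0 or B = 0 with A[0] == 0 (len(A)**negative is a float).
def Pre_solve (A : List Int) (B : Int) (C : Int) : Prop :=
  A = [] ∨ (0 ≤ C ∧ (1 ≤ B ∨ (B = 0 ∧ A.headI ≠ 0)))
instance (A : List Int) (B : Int) (C : Int) : Decidable (Pre_solve A B C) := by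
  unfold Pre_solve; infer_instance
def pvWitness_solve : List Int × Int × Int := ([1, 2], 2, 15)

def Spec_solve (A : List Int) (B : Int) (C : Int) (out : Int) : Prop := out = solve_alt A B C
instance (A : List Int) (B : Int) (C : Int) (out : Int) : Decidable (Spec_solve A B C out) := by
  unfold Spec_solve; infer_instance

-- ===== CLAIM (what is proved, stated in full; the proofs are below) =====
def Claim_equal_solve : Prop :=
  ∀ (A : List Int) (B : Int) (C : Int), Dom_solve A B C → Pre_solve A B C →
    Spec_solve A B C (solve A B C)

-- ===== LEMMAS AND PROOFS =====

-- A's digit extraction (index loop over str(C)) equals B's comprehension over the characters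
lemma digitsA_eq (C : Int) :
    (PySem.List.pyRange 0 (PySem.Str.len (PySem.Int.toStr C)) 1).foldl
      (fun ds i =>
        ds ++ [((PySem.Str.pyGet? (PySem.Int.toStr C) i).bind
                  (fun c => PySem.Int.ofStr? (String.mk [c]))).getD 0]) []
    = (PySem.Int.toChars C).map (fun ch => (PySem.Int.ofStr? (String.mk [ch])).getD 0) := by
  rw [PySem.List.foldl_append_singleton_eq_map]
  rw [PySem.Str.len_eq, PySem.Int.toList_toStr]
  rw [show ((PySem.Int.toChars C).length : Int) = ((PySem.Int.toChars C).length : Nat) from rfl,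
      PySem.List.pyRange_zero_nat]
  rw [List.map_map, List.nil_append]
  apply List.ext_getElem
  · simp
  · intro k h1 h2
    simp only [List.getElem_map, Function.comp, List.getElem_range]
    rw [PySem.Str.pyGet?_eq, PySem.Int.toList_toStr]
    simp only [List.length_map, List.length_range] at h1
    simp only [PySem.Chars.pyGet?_eq_listPyGet?, Nat.cast_nonneg, Nat.cast_lt, h1,
      PySem.List.pyGet?_of_nonneg_of_lt, Int.toNat_natCast, getElem?_pos, Option.bind_some]

-- A's inner 'exist' rescan over the prefix equals 'every digit of the prefix is in A'
lemma existA_eq (A ds : List Int) (j : Nat) (hj : j ≤ ds.length) :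
    (PySem.List.pyRange 0 (j : Int) 1).foldl
      (fun e k => if PySem.List.pyGetD ds k 0 ∉ A then (0 : Int) else e) 1
    = if (ds.take j).all (fun d => decide (d ∈ A)) then 1 else 0 := by
  induction j with
  | zero => simp [PySem.List.pyRange_one_eq_nil]
  | succ j ih =>
    have hj' : j ≤ ds.length := Nat.le_of_succ_le hj
    rw [show ((j + 1 : Nat) : Int) = (j : Int) + 1 by push_cast; ring,
        PySem.List.pyRange_one_succ_right (by omega), List.foldl_append, ih hj']
    have hlt : j < ds.length := hj
    have hget : PySem.List.pyGetD ds (j : Int) 0 = ds[j] := by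
      simp [PySem.List.pyGetD_natCast, List.getD_eq_getElem?_getD, hlt]
    have htake : ds.take (j + 1) = ds.take j ++ [ds[j]] := by
      rw [List.take_add_one]; simp [List.getElem?_eq_getElem hlt]
    rw [htake]
    simp only [List.foldl_cons, List.foldl_nil, List.all_append, List.all_cons, List.all_nil, hget]
    by_cases hm : ds[j] ∈ A <;> by_cases hall : (ds.take j).all (fun d => decide (d ∈ A)) <;>
      simp [hm, hall]

-- A's 'add' accumulation loop is a countP
lemma addA_eq (A : List Int) (d i Bv : Int) :
    A.foldl
      (fun add m =>
        if m < d then if m ≠ 0 ∨ i ≠ 1 ∨ Bv = 1 then add + 1 else add else add) 0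
    = (A.countP (fun m => decide (m < d ∧ (m ≠ 0 ∨ i ≠ 1 ∨ Bv = 1))) : Int) := by
  have h : (fun (add : Int) (m : Int) =>
        if m < d then if m ≠ 0 ∨ i ≠ 1 ∨ Bv = 1 then add + 1 else add else add)
      = fun add m => if (fun m => decide (m < d ∧ (m ≠ 0 ∨ i ≠ 1 ∨ Bv = 1))) m = true
                     then add + 1 else add := by
    funext add m
    by_cases h1 : m < d <;> by_cases h2 : m ≠ 0 ∨ i ≠ 1 ∨ Bv = 1 <;> simp [h1, h2]
  rw [h, PySem.List.foldl_if_add_one]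
  simp

lemma enumerate_append_singleton {α : Type} (xs : List α) (y : α) (s : Int) :
    PySem.List.enumerate (xs ++ [y]) s
    = PySem.List.enumerate xs s ++ [(s + xs.length, y)] := by
  induction xs generalizing s with
  | nil => simp [PySem.List.enumerate_cons, PySem.List.enumerate_nil]
  | cons x xs ih =>
    simp only [List.cons_append, PySem.List.enumerate_cons, ih, List.length_cons]
    push_cast; ring_nf

-- the coupling invariant: after j iterations A's dp has length j+1, its last entry is B's
-- accumulator over the first j digits, and B's flag says 'every digit of the prefix is in A'
lemma loop_invariant (A ds : List Int) (Bv : Int) (j : Nat) (hj : j ≤ ds.length) :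
    (((PySem.List.pyRange 1 ((j : Int) + 1) 1).foldl (solveStepA A ds Bv) [0]).length = j + 1)
    ∧ (PySem.List.pyGetD
        ((PySem.List.pyRange 1 ((j : Int) + 1) 1).foldl (solveStepA A ds Bv) [0]) (j : Int) 0
      = ((PySem.List.enumerate (ds.take j) 0).foldl
          (solveStepB A (PySem.Set.ofList A) Bv) (0, true)).1)
    ∧ (((PySem.List.enumerate (ds.take j) 0).foldl
          (solveStepB A (PySem.Set.ofList A) Bv) (0, true)).2
      = (ds.take j).all (fun d => decide (d ∈ A))) := by
  induction j with
  | zero => simp [PySem.List.pyRange_one_eq_nil, PySem.List.enumerate_nil]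
  | succ j ih =>
    have hj' : j ≤ ds.length := Nat.le_of_succ_le hj
    have hlt : j < ds.length := hj
    obtain ⟨ihlen, ihval, ihflag⟩ := ih hj'
    set dp := (PySem.List.pyRange 1 ((j : Int) + 1) 1).foldl (solveStepA A ds Bv) [0] with hdp
    set st := (PySem.List.enumerate (ds.take j) 0).foldl
        (solveStepB A (PySem.Set.ofList A) Bv) (0, true) with hst
    have hrange : PySem.List.pyRange 1 (((j + 1 : Nat) : Int) + 1) 1
        = PySem.List.pyRange 1 ((j : Int) + 1) 1 ++ [(j : Int) + 1] := by
      rw [show (((j + 1 : Nat) : Int) + 1) = ((j : Int) + 1) + 1 by push_cast; ring,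
          PySem.List.pyRange_one_succ_right (by omega)]
    have htake : ds.take (j + 1) = ds.take j ++ [ds[j]] := by
      rw [List.take_add_one]; simp [List.getElem?_eq_getElem hlt]
    have henum : PySem.List.enumerate (ds.take (j + 1)) 0
        = PySem.List.enumerate (ds.take j) 0 ++ [((j : Int), ds[j])] := by
      rw [htake, enumerate_append_singleton]
      simp [List.length_take, Nat.min_eq_left hj']
    have hgetds : PySem.List.pyGetD ds (j : Int) 0 = ds[j] := by
      simp [PySem.List.pyGetD_natCast, List.getD_eq_getElem?_getD, hlt]
    rw [hrange, List.foldl_append, List.foldl_cons, List.foldl_nil, ← hdp]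
    rw [henum, List.foldl_append, List.foldl_cons, List.foldl_nil, ← hst]
    have hsub : ((j : Int) + 1) - 1 = (j : Int) := by ring
    have hexist := existA_eq A ds j hj'
    unfold solveStepA solveStepB
    simp only [hsub, hgetds, hexist, ihval, ihflag]
    have hlen' : (dp ++ [st.1 * (A.length : Int)]).length = j + 2 := by
      simp [ihlen]
    have hcast : ((j : Int) + 1) = ((j + 1 : Nat) : Int) := by push_cast; ring
    have hconcat : PySem.List.pyGetD (dp ++ [st.1 * (A.length : Int)]) ((j : Int) + 1) 0
        = st.1 * (A.length : Int) := by
      rw [hcast, PySem.List.pyGetD_natCast]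
      rw [List.getD_eq_getElem?_getD, ← ihlen, List.getElem?_concat_length]
      rfl
    by_cases hall : (ds.take j).all (fun d => decide (d ∈ A))
    · simp only [hall, if_true, if_pos (by decide : (1 : Int) ≠ 0), ne_eq]
      refine ⟨?_, ?_, ?_⟩
      · rw [hcast, PySem.List.pySetD_natCast]
        simp [hlen']
      · rw [hconcat, addA_eq A (ds[j]) ((j : Int) + 1) Bv]
        rw [hcast, PySem.List.pySetD_natCast, PySem.List.pyGetD_natCast]
        have hjlt : j + 1 < (dp ++ [st.1 * (A.length : Int)]).length := by omega
        rw [List.getD_eq_getElem?_getD, List.getElem?_set_self hjlt]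
        have hiff : ((j : Int) + 1 ≠ 1) ↔ ((j : Int) ≠ 0) := by omega
        simp [hiff]
      · have hc : (PySem.Set.ofList A).contains ds[j] = decide (ds[j] ∈ A) := by
          simp [PySem.Set.contains]
        rw [hc, htake]
        simp only [List.all_append, List.all_cons, List.all_nil, hall, Bool.true_and,
          Bool.and_true]
    · simp only [Bool.not_eq_true] at hall
      simp only [hall, Bool.false_eq_true, if_false, ne_eq, not_true_eq_false]
      refine ⟨?_, ?_, ?_⟩
      · simpa using hlen'
      · rw [show ((j + 1 : Nat) : Int) = (j : Int) + 1 by push_cast; ring, hconcat]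
      · rw [htake]
        simp only [List.all_append, hall, Bool.false_and]

-- ===== VERDICT (by name: the statement is the Claim_ definition above) =====
theorem solve_spec : Claim_equal_solve := by
  intro A B C _ _
  unfold Spec_solve
  simp only [solve, solve_alt]
  by_cases hA : A = []
  · simp [hA]
  · have hAlen : ¬ A.length = 0 := by simpa using hA
    rw [if_neg hAlen, if_neg hA]
    rw [digitsA_eq C]
    have hlen : PySem.Str.len (PySem.Int.toStr C)
        = (((PySem.Int.toChars C).map
            (fun ch => (PySem.Int.ofStr? (String.mk [ch])).getD 0)).length : Int) := by
      rw [PySem.Str.len_eq, PySem.Int.toList_toStr]; simp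
    rw [hlen]
    set ds := (PySem.Int.toChars C).map
        (fun ch => (PySem.Int.ofStr? (String.mk [ch])).getD 0) with hds
    by_cases h1 : B > (ds.length : Int)
    · rw [if_pos h1, if_pos h1]
    · rw [if_neg h1, if_neg h1]
      by_cases h2 : B < (ds.length : Int)
      · rw [if_pos h2, if_pos h2]
        have hhead : PySem.List.pyGetD A 0 0 = A.headI := by
          cases A with
          | nil => exact absurd rfl hA
          | cons a t => simp [PySem.List.pyGetD_zero_cons]
        rw [hhead]
      · rw [if_neg h2, if_neg h2]
        have hB : B = (ds.length : Int) := by omega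
        subst hB
        have := loop_invariant A ds (ds.length : Int) ds.length (le_refl _)
        rw [List.take_length] at this
        exact this.2.1
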